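-- pv_equiv track=rewrite | github.com/pypi-data/pypi-mirror-75 | packages/agv-fact/agv_fact-0.0.0.4-py3-none-any.whl/fact/generator/utils.py | replace_char
-- ===== SOURCE A (Python) =====
-- def replace_char(text, de, a):
--     a = a
--     for i in de.encode().decode('utf-8'):
--         for j in a.encode().decode('utf-8'):
--             text = text.replace(i, j)
--             if a.find(j) != -1:
--                 a = a[a.find(j) + 1:]
--             break
--     return text
-- ===== SOURCE B (Python) =====
-- def replace_char(text, de, a):
--     # Compose the chain of sequential single-char replacements right-to-left
--     # into one translation table, then apply it to text in a single pass.
--     g = {}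
--     for i, j in reversed(list(zip(de, a))):
--         g[i] = g.get(j, j)
--     return text.translate({ord(k): v for k, v in g.items()})
-- ===== Notes on version B (the rewrite author's own statement) =====
-- stated objective: faster
-- what changed: Instead of running one full text.replace pass per character of de, B composes the chain of sequential single-char substitutions right-to-left into one translation table in a single O(len(de)) pass and applies it to the text with one str.translate pass.
import Mathlib
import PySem

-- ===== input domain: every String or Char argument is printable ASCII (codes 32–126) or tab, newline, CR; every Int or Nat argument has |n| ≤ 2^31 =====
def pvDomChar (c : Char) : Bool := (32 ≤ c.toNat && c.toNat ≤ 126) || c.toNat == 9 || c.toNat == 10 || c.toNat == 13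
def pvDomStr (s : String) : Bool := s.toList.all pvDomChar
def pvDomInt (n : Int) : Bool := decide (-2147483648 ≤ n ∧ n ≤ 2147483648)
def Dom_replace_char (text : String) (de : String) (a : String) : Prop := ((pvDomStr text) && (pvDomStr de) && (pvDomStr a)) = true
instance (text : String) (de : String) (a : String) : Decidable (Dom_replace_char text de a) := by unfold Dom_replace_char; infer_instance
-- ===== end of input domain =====

-- B composes the chain of sequential single-char replacements into one translation
-- table and applies it to text in a single pass (objective: faster).

-- ===== PORT A =====
-- loop body of A: for the current char i of de, take the first char j of the
-- remaining a (break after one iteration), replace i by j in text, and drop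
-- everything up to and including the first occurrence of j from a.
def pvStepA (s : String × String) (i : Char) : String × String :=
  match s.2.toList with
  | [] => s
  | j :: _ =>
    let t' := PySem.Str.replace s.1 (String.ofList [i]) (String.ofList [j])
    let f := PySem.Str.find s.2 (String.ofList [j])
    let a' := if f ≠ -1 then PySem.Str.slice s.2 (some (f + 1)) none else s.2
    (t', a')

def replace_char (text : String) (de : String) (a : String) : String :=
  (de.toList.foldl pvStepA (text, a)).1

-- ===== PORT B =====
def replace_char_alt (text : String) (de : String) (a : String) : String :=
  let g : PySem.Dict Char Char :=
    (de.toList.zip a.toList).reverse.foldl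
      (fun g p => g.insert p.1 (g.getD p.2 p.2)) PySem.Dict.empty
  String.ofList (text.toList.map (fun c => g.getD c c))

-- ===== PRECONDITION & SPEC =====
def Spec_replace_char (text : String) (de : String) (a : String) (out : String) : Prop := out = replace_char_alt text de a
instance (text : String) (de : String) (a : String) (out : String) : Decidable (Spec_replace_char text de a out) := by unfold Spec_replace_char; infer_instance

-- ===== CLAIM (what is proved, stated in full; the proofs are below) =====
def Claim_equal_replace_char : Prop := ∀ (text : String) (de : String) (a : String), Dom_replace_char text de a → Spec_replace_char text de a (replace_char text de a)

-- ===== LEMMAS AND PROOFS =====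

-- the composed per-char substitution: x = c; for (i, j) in pairs: if x == i: x = j
def pvChain (pairs : List (Char × Char)) (c : Char) : Char :=
  pairs.foldl (fun x p => if x = p.1 then p.2 else x) c

-- single-char replace is a map over the characters
theorem pv_replace_go_map (i j : Char) :
    ∀ (fuel : Nat) (l acc : List Char), l.length ≤ fuel →
      PySem.Chars.replace.go [i] [j] fuel l acc =
        acc.reverse ++ l.map (fun c => if c = i then j else c) := by
  intro fuel
  induction fuel with
  | zero =>
    intro l acc h
    have : l = [] := by cases l <;> simp_all
    subst this; simp [PySem.Chars.replace.go]
  | succ n ih =>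
    intro l acc h
    cases l with
    | nil => simp [PySem.Chars.replace.go]
    | cons c t =>
      simp only [PySem.Chars.replace.go]
      by_cases hc : c = i
      · subst hc
        have hp : List.isPrefixOf [c] (c :: t) = true := by simp [List.isPrefixOf]
        rw [if_pos hp]
        have := ih t ([j].reverse ++ acc) (by simpa using Nat.lt_succ_iff.mp (by simpa using h))
        simpa using this
      · have hp : List.isPrefixOf [i] (c :: t) = false := by
          simp [List.isPrefixOf]; exact fun hip => absurd hip.symm hc
        rw [if_neg (by simp [hp])]
        have := ih t (c :: acc) (by simpa using Nat.lt_succ_iff.mp (by simpa using h))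
        rw [this]; simp [hc]

theorem pv_replace_single (s : List Char) (i j : Char) :
    PySem.Chars.replace s [i] [j] = s.map (fun c => if c = i then j else c) := by
  simpa [PySem.Chars.replace] using pv_replace_go_map i j s.length s [] le_rfl

-- the first character of a string is found at index 0
theorem pv_find_head (j : Char) (rest : List Char) :
    PySem.Chars.find (j :: rest) [j] = 0 := by
  have h : ([j] : List Char) <+: (j :: rest) := ⟨rest, rfl⟩
  have hnn : 0 ≤ PySem.Chars.find (j :: rest) [j] := by
    rw [PySem.Chars.find_nonneg_iff]; exact h.isInfix
  have hs := PySem.Chars.find_spec (s := j :: rest) (sub := [j]) hnn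
  by_contra hne
  have hpos : 0 < (PySem.Chars.find (j :: rest) [j]).toNat := by omega
  exact absurd h (hs.2 0 hpos)

-- pvChain on a cons
theorem pv_chain_cons (p : Char × Char) (ps : List (Char × Char)) (c : Char) :
    pvChain (p :: ps) c = pvChain ps (if c = p.1 then p.2 else c) := rfl

-- A's loop computes the composed substitution applied to every character
theorem pv_loopA (de_l : List Char) :
    ∀ (t rem : String),
      ((de_l.foldl pvStepA (t, rem)).1).toList =
        t.toList.map (pvChain (de_l.zip rem.toList)) := by
  induction de_l with
  | nil => intro t rem; exact (List.map_id' t.toList).symm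
  | cons i de' ih =>
    intro t rem
    rw [List.foldl_cons]
    cases hrem : rem.toList with
    | nil =>
      have hstep : pvStepA (t, rem) i = (t, rem) := by
        simp [pvStepA, hrem]
      rw [hstep, ih t rem, hrem]
      simp
    | cons j rest =>
      have hfind : PySem.Str.find rem (String.ofList [j]) = 0 := by
        rw [PySem.Str.find_eq, String.toList_ofList, hrem, pv_find_head]
      have hstep : pvStepA (t, rem) i =
          (PySem.Str.replace t (String.ofList [i]) (String.ofList [j]),
           PySem.Str.slice rem (some 1) none) := by
        simp [pvStepA, hrem, pv_find_head]
      rw [hstep, ih]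
      have ht : (PySem.Str.replace t (String.ofList [i]) (String.ofList [j])).toList =
          t.toList.map (fun c => if c = i then j else c) := by
        rw [PySem.Str.toList_replace, String.toList_ofList, String.toList_ofList,
          pv_replace_single]
      have ha : (PySem.Str.slice rem (some 1) none).toList = rest := by
        simp only [PySem.Str.slice, String.toList_ofList, PySem.Chars.slice]
        rw [PySem.List.slice_from_one, hrem]
        rfl
      rw [ht, ha, List.zip_cons_cons, List.map_map]
      apply List.map_congr_left
      intro c _
      rw [pv_chain_cons]
      rfl

-- B's right-to-left composition table looks up to the composed substitution
theorem pv_g_getD (ps : List (Char × Char)) (c : Char) :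
    ((ps.reverse.foldl (fun (g : PySem.Dict Char Char) p =>
        g.insert p.1 (g.getD p.2 p.2)) PySem.Dict.empty).getD c c) = pvChain ps c := by
  rw [List.foldl_reverse]
  induction ps generalizing c with
  | nil => simp [pvChain]
  | cons p ps' ih =>
    rw [List.foldr_cons, pv_chain_cons, PySem.Dict.getD_insert]
    by_cases hc : c = p.1
    · rw [if_pos hc, if_pos hc]
      exact ih p.2
    · rw [if_neg hc, if_neg hc]
      exact ih c

theorem pv_main (text de a : String) :
    replace_char text de a = replace_char_alt text de a := by
  rw [← String.toList_inj]
  unfold replace_char replace_char_alt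
  rw [pv_loopA, String.toList_ofList]
  apply List.map_congr_left
  intro c _
  exact (pv_g_getD (de.toList.zip a.toList) c).symm

-- ===== VERDICT (by name: the statement is the Claim_ definition above) =====
theorem replace_char_spec : Claim_equal_replace_char := by
  intro text de a _
  unfold Spec_replace_char
  exact pv_main text de a
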